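-- pv_equiv track=rewrite | github.com/orzuk/BandedDecomposition | constrained_decomposition_general.py | make_blocks
-- ===== SOURCE A (Python) =====
-- def make_blocks(n: int, r: int):
--     """
--     Partition {0,...,n-1} into r contiguous blocks (sizes differ by at most 1).
--     """
--     r = int(r)
--     if r < 1 or r > n:
--         raise ValueError("blocks r must satisfy 1 <= r <= n")
--     sizes = [n // r] * r
--     for t in range(n % r):
--         sizes[t] += 1
--     blocks = []
--     start = 0
--     for sz in sizes:
--         blocks.append(list(range(start, start + sz)))
--         start += sz
--     return blocks
-- ===== SOURCE B (Python) =====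
-- def make_blocks(n: int, r: int):
--     """
--     Partition {0,...,n-1} into r contiguous blocks (sizes differ by at most 1).
--     Single pass: each block takes the ceiling of the remaining elements over the
--     remaining blocks, so no sizes array is precomputed.
--     """
--     r = int(r)
--     if r < 1 or r > n:
--         raise ValueError("blocks r must satisfy 1 <= r <= n")
--     blocks = []
--     start = 0
--     remaining = n
--     for k in range(r, 0, -1):
--         sz = -(-remaining // k)
--         blocks.append(list(range(start, start + sz)))
--         start += sz
--         remaining -= sz
--     return blocks
-- ===== Notes on version B (the rewrite author's own statement) =====
-- stated objective: alternative
-- what changed: Replaces A's two-phase scheme (precompute a sizes array, bump the first n%r entries, then slice cumulatively) with a single pass that takes the ceiling of remaining elements over remaining blocks for each block, computing sizes on the fly.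
import Mathlib
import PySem

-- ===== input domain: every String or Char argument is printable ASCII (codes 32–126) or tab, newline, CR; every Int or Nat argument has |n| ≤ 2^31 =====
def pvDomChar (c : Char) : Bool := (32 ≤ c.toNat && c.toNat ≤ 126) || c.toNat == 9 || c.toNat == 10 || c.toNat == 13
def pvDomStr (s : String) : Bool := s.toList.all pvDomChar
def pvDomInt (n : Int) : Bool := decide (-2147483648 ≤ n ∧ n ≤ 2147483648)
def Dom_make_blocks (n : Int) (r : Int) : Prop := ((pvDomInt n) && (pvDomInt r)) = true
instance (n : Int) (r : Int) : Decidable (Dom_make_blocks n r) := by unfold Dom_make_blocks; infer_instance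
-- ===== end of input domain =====

-- B computes each block size on the fly as a ceiling of remaining/blocks-left in one pass,
-- instead of A's precomputed sizes array; equivalence is proved on 1 <= r <= n (elsewhere A raises ValueError).

-- ===== PORT A =====
-- the increment loop's index t is always in range (0 ≤ t < n%r ≤ r = len(sizes)), so set/getD are exact
def make_blocks (n : Int) (r : Int) : List (List Int) :=
  if r < 1 ∨ r > n then []  -- Python raises ValueError here; excluded by Pre_make_blocks
  else
    let sizes0 := PySem.List.pyRepeat [PySem.Int.floordiv n r] r
    let sizes := (PySem.List.pyRange 0 (PySem.Int.mod n r) 1).foldl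
        (fun s t => s.set t.toNat (s.getD t.toNat 0 + 1)) sizes0
    (sizes.foldl
        (fun (acc : List (List Int) × Int) sz =>
          (acc.1 ++ [PySem.List.pyRange acc.2 (acc.2 + sz) 1], acc.2 + sz)) ([], 0)).1

-- ===== PORT B =====
def mbStep (acc : List (List Int) × Int × Int) (k : Int) : List (List Int) × Int × Int :=
  let sz := -(PySem.Int.floordiv (-acc.2.2) k)
  (acc.1 ++ [PySem.List.pyRange acc.2.1 (acc.2.1 + sz) 1], acc.2.1 + sz, acc.2.2 - sz)

def make_blocks_alt (n : Int) (r : Int) : List (List Int) :=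
  if r < 1 ∨ r > n then []  -- Python raises ValueError here; excluded by Pre_make_blocks
  else ((PySem.List.pyRange r 0 (-1)).foldl mbStep ([], 0, n)).1

-- ===== PRECONDITION & SPEC =====
-- exactly the inputs on which Python A returns (otherwise it raises ValueError)
def Pre_make_blocks (n : Int) (r : Int) : Prop := 1 ≤ r ∧ r ≤ n
instance (n : Int) (r : Int) : Decidable (Pre_make_blocks n r) := by unfold Pre_make_blocks; infer_instance
def pvWitness_make_blocks : Int × Int := (7, 3)

def Spec_make_blocks (n : Int) (r : Int) (out : List (List Int)) : Prop := out = make_blocks_alt n r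
instance (n : Int) (r : Int) (out : List (List Int)) : Decidable (Spec_make_blocks n r out) := by unfold Spec_make_blocks; infer_instance

-- ===== CLAIM =====
def Claim_equal_make_blocks : Prop := ∀ (n : Int) (r : Int), Dom_make_blocks n r → Pre_make_blocks n r → Spec_make_blocks n r (make_blocks n r)

-- ===== LEMMAS AND PROOFS =====

/-- Proof-side view: blocks produced from a list of sizes starting at `start`. -/
def buildFrom (start : Int) : List Int → List (List Int)
  | [] => []
  | sz :: rest => PySem.List.pyRange start (start + sz) 1 :: buildFrom (start + sz) rest

theorem foldA_eq_build (l : List Int) : ∀ (acc : List (List Int)) (start : Int),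
    (l.foldl (fun (acc : List (List Int) × Int) sz =>
        (acc.1 ++ [PySem.List.pyRange acc.2 (acc.2 + sz) 1], acc.2 + sz)) (acc, start))
      = (acc ++ buildFrom start l, start + l.sum) := by
  induction l with
  | nil => intro acc start; simp [buildFrom]
  | cons sz rest ih =>
    intro acc start
    simp only [List.foldl_cons, ih, buildFrom, Prod.mk.injEq]
    constructor
    · simp
    · simp [List.sum_cons]; ring

theorem incr_loop (q : Int) (r' : Nat) : ∀ (m : Nat), m ≤ r' →
    (PySem.List.pyRange 0 (m : Int) 1).foldl
        (fun s t => s.set t.toNat (s.getD t.toNat 0 + 1)) (List.replicate r' q)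
      = List.replicate m (q + 1) ++ List.replicate (r' - m) q := by
  intro m
  induction m with
  | zero => intro _; simp [PySem.List.pyRange_one_eq_nil]
  | succ m ih =>
    intro hm
    have h1 : ((m : Int)) ≤ ((m : Int) + 1) := by omega
    have hr : PySem.List.pyRange 0 ((m : Int) + 1) 1
        = PySem.List.pyRange 0 (m : Int) 1 ++ [(m : Int)] := by
      have := PySem.List.pyRange_one_succ_right (a := 0) (b := (m : Int)) (by omega)
      simpa using this
    have hcast : ((m + 1 : Nat) : Int) = (m : Int) + 1 := by push_cast; ring
    rw [hcast, hr, List.foldl_append, ih (by omega)]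
    simp only [List.foldl_cons, List.foldl_nil, Int.toNat_natCast]
    have hlen : (List.replicate m (q + 1)).length = m := by simp
    have hm' : m < r' := by omega
    have hget : (List.replicate m (q + 1) ++ List.replicate (r' - m) q).getD m 0 = q := by
      rw [List.getD_eq_getElem?_getD, List.getElem?_append_right (by simp)]
      have hpos : 0 < r' - m := by omega
      simp [hlen, hpos]
    rw [hget, List.set_append_right _ _ (by simp)]
    have hrep : (List.replicate (r' - m) q).set (m - (List.replicate m (q+1)).length) (q + 1)
        = (q + 1) :: List.replicate (r' - (m+1)) q := by
      have : r' - m = (r' - (m+1)) + 1 := by omega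
      simp [hlen, this, List.replicate_succ]
    rw [hrep]
    rw [show List.replicate (m+1) (q+1) = List.replicate m (q+1) ++ [q+1] from by
      simp [List.replicate_succ']]
    simp

theorem ceil_div (N k : Int) (q rem : Nat) (hk : 0 < k)
    (hN : N = q * k + (rem : Int)) (hrem : (rem : Int) < k) :
    -(PySem.Int.floordiv (-N) k) = if rem = 0 then (q : Int) else (q : Int) + 1 := by
  rcases Nat.eq_zero_or_pos rem with h | h
  · subst h
    rw [if_pos rfl, (PySem.Int.neg_floordiv_neg_eq_iff_of_pos (a := N) (b := k) (q := (q : Int)) hk)]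
    constructor
    · have : (0:Int) < k := hk
      nlinarith [this, hN]
    · simp [hN]
  · rw [if_neg (by omega), (PySem.Int.neg_floordiv_neg_eq_iff_of_pos (a := N) (b := k) (q := (q : Int) + 1) hk)]
    have hr0 : (0:Int) < (rem : Int) := by exact_mod_cast h
    constructor
    · nlinarith
    · nlinarith

theorem foldB_eq_build : ∀ (k q rem : Nat), (rem < k ∨ (k = 0 ∧ rem = 0)) →
    ∀ (start : Int) (acc : List (List Int)),
    (PySem.List.pyRange (k : Int) 0 (-1)).foldl mbStep (acc, start, ((q * k + rem : Nat) : Int))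
      = (acc ++ buildFrom start
            (List.replicate rem ((q : Int) + 1) ++ List.replicate (k - rem) (q : Int)),
         start + ((q * k + rem : Nat) : Int), 0) := by
  intro k
  induction k with
  | zero =>
    intro q rem h start acc
    have : rem = 0 := by omega
    subst this
    simp [PySem.List.pyRange_neg_one_eq_nil, buildFrom]
  | succ k ih =>
    intro q rem h start acc
    have hrem : rem < k + 1 := by omega
    have hcons : PySem.List.pyRange ((k + 1 : Nat) : Int) 0 (-1)
        = ((k + 1 : Nat) : Int) :: PySem.List.pyRange (((k + 1 : Nat) : Int) - 1) 0 (-1) :=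
      PySem.List.pyRange_neg_one_cons (by positivity)
    have hkc : (((k + 1 : Nat) : Int) - 1) = (k : Int) := by push_cast; ring
    rw [hcons, hkc, List.foldl_cons]
    have hsz : -(PySem.Int.floordiv (-((q * (k+1) + rem : Nat) : Int)) ((k + 1 : Nat) : Int))
        = if rem = 0 then (q : Int) else (q : Int) + 1 := by
      apply ceil_div _ _ q rem (by positivity) (by push_cast; ring) (by exact_mod_cast hrem)
    obtain _ | s := rem
    · rw [if_pos rfl] at hsz
      simp only [mbStep, hsz]
      have hN : ((q * (k+1) + 0 : Nat) : Int) - (q : Int) = ((q * k + 0 : Nat) : Int) := by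
        push_cast; ring
      rw [hN, ih q 0 (by omega) (start + (q : Int)) _]
      simp only [Prod.mk.injEq]
      refine ⟨?_, ?_, trivial⟩
      · simp [buildFrom, List.replicate_succ]
      · push_cast; ring
    · rw [if_neg (by omega)] at hsz
      simp only [mbStep, hsz]
      have hN : ((q * (k+1) + (s+1) : Nat) : Int) - ((q : Int) + 1) = ((q * k + s : Nat) : Int) := by
        push_cast; ring
      rw [hN, ih q s (by omega) (start + ((q : Int) + 1)) _]
      simp only [Prod.mk.injEq]
      refine ⟨?_, ?_, trivial⟩
      · have hsub : k + 1 - (s+1) = k - s := by omega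
        simp [hsub, buildFrom, List.replicate_succ]
      · push_cast; ring

-- ===== VERDICT =====
theorem make_blocks_spec : Claim_equal_make_blocks := by
  intro n r _ hpre
  obtain ⟨hr1, hrn⟩ := hpre
  unfold Spec_make_blocks make_blocks make_blocks_alt
  rw [if_neg (by omega), if_neg (by omega)]
  have hrpos : (0:Int) < r := by omega
  set q : Int := PySem.Int.floordiv n r with hq
  have hqdiv : q = n / r := by rw [hq, PySem.Int.floordiv_eq_ediv_of_pos hrpos]
  have hmod : PySem.Int.mod n r = n % r := PySem.Int.mod_eq_emod_of_pos hrpos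
  set m : Nat := (n % r).toNat with hm
  have hnn : 0 ≤ n % r := Int.emod_nonneg n (by omega)
  have hlt : n % r < r := Int.emod_lt_of_pos n hrpos
  have hmle : m ≤ r.toNat := by omega
  have hmcast : ((m : Int)) = n % r := by omega
  have hrep : PySem.List.pyRepeat [q] r = List.replicate r.toNat q := by
    simp [PySem.List.pyRepeat_singleton (a := q) (n := r)]
  -- A's side
  simp only [hrep, hmod, ← hmcast, incr_loop q r.toNat m hmle, foldA_eq_build]
  -- B's side: n = q.toNat * r.toNat + m
  have hq0 : 0 ≤ q := by
    rw [hqdiv]; exact Int.ediv_nonneg (by omega) (by omega)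
  have hqc : ((q.toNat : Nat) : Int) = q := Int.toNat_of_nonneg hq0
  have hrc : ((r.toNat : Nat) : Int) = r := Int.toNat_of_nonneg (by omega)
  have hsplit : n = ((q.toNat * r.toNat + m : Nat) : Int) := by
    push_cast
    rw [hqc, hrc, hqdiv, hmcast]
    linarith [Int.emod_add_mul_ediv n r, (mul_comm (n / r) r : n / r * r = r * (n / r))]
  have hmlt : m < r.toNat ∨ (r.toNat = 0 ∧ m = 0) := by left; omega
  have hrcast : r = ((r.toNat : Nat) : Int) := hrc.symm
  rw [hrcast, hsplit, foldB_eq_build r.toNat q.toNat m hmlt 0 []]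
  have hmax : (max r 0).toNat = r.toNat := by omega
  simp [hqc, hmax]
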